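-- pv_equiv track=rewrite | github.com/aldringordon/adventofcode-22 | Day10-CathodeRayTube/CathodeRayTuby.py | exec_prog
-- ===== SOURCE A (Python) =====
-- def exec_prog(data):
--     cycles = []
--     x = 1
--     cycles.append(x)
--     for ins in data:
--         if ins[0] == 'noop':
--             cycles.append(x)
--         elif ins[0] == 'addx' and ins[1]:
--             cycles.append(x)
--             cycles.append(x)
--             x += int(ins[1])
--     cycles.append(x)
--     return cycles
-- ===== SOURCE B (Python) =====
-- def exec_prog(data):
--     # Two-stage pipeline: flatten the program into per-tick deltas (addx's
--     # increment lands one tick later, hence the global [0] shift via the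
--     # [1, 1] seed), then take running sums by reading trace[-1].
--     def ticks(ins):
--         if ins[0] == 'noop':
--             return [0]
--         if ins[0] == 'addx' and ins[1]:
--             return [0, int(ins[1])]
--         return []
--     trace = [1, 1]
--     for d in (d for ins in data for d in ticks(ins)):
--         trace.append(trace[-1] + d)
--     return trace
-- ===== Notes on version B (the rewrite author's own statement) =====
-- stated objective: alternative
-- what changed: B is a two-stage pipeline: it flattens the program into a per-tick delta list (a flatMap, with addx's increment shifted one tick later) and then builds the trace as running sums read off trace[-1], instead of A's single stateful loop that appends a running register per branch.
import Mathlib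
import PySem

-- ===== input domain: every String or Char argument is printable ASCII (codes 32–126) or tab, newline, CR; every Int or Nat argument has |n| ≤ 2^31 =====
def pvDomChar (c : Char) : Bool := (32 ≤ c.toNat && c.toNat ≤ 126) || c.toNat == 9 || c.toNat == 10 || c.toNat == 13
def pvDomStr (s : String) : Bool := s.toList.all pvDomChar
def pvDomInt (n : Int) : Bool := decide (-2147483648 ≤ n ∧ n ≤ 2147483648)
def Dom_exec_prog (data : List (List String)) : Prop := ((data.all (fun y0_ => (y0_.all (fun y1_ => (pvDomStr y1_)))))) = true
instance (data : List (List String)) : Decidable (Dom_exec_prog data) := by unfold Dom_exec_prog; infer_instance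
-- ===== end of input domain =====

-- B restructures A into a flatMap-then-prefix-sum pipeline; same values everywhere A returns.

-- ===== PORT A =====
-- step of A's loop: state = (cycles, x)
def execProgStepA (acc : List Int × Int) (ins : List String) : List Int × Int :=
  if (PySem.List.pyGet? ins 0).getD "" = "noop" then
    (acc.1 ++ [acc.2], acc.2)
  else if (PySem.List.pyGet? ins 0).getD "" = "addx" ∧ (PySem.List.pyGet? ins 1).getD "" ≠ "" then
    (acc.1 ++ [acc.2, acc.2],
     acc.2 + (PySem.Int.ofStr? ((PySem.List.pyGet? ins 1).getD "")).getD 0)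
  else acc

def exec_prog (data : List (List String)) : List Int :=
  let fin := data.foldl execProgStepA ([1], 1)
  fin.1 ++ [fin.2]

-- ===== PORT B =====
-- per-instruction tick deltas (Source B's local 'ticks')
def pvTicks (ins : List String) : List Int :=
  if (PySem.List.pyGet? ins 0).getD "" = "noop" then [0]
  else if (PySem.List.pyGet? ins 0).getD "" = "addx" ∧ (PySem.List.pyGet? ins 1).getD "" ≠ "" then
    [0, (PySem.Int.ofStr? ((PySem.List.pyGet? ins 1).getD "")).getD 0]
  else []

-- Source B's running-sum step: trace.append(trace[-1] + d)
def pvSumStep (tr : List Int) (d : Int) : List Int :=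
  tr ++ [(PySem.List.pyGet? tr (-1)).getD 0 + d]

def exec_prog_alt (data : List (List String)) : List Int :=
  (data.flatMap pvTicks).foldl pvSumStep [1, 1]

-- ===== PRECONDITION & SPEC =====
-- Pre_ excludes exactly the inputs where Python A raises: an empty instruction
-- (IndexError on ins[0]), an 'addx' with no operand (IndexError on ins[1]),
-- or an 'addx' whose truthy operand is not int()-parsable (ValueError).
def Pre_exec_prog (data : List (List String)) : Prop :=
  ∀ ins ∈ data, ins ≠ [] ∧
    (ins.headD "" = "addx" →
      2 ≤ ins.length ∧
      (ins.getD 1 "" ≠ "" → (PySem.Int.ofStr? (ins.getD 1 "")).isSome = true))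
instance (data : List (List String)) : Decidable (Pre_exec_prog data) := by
  unfold Pre_exec_prog; infer_instance

def pvWitness_exec_prog : List (List String) := [["noop"], ["addx", "3"], ["addx", "-5"]]

def Spec_exec_prog (data : List (List String)) (out : List Int) : Prop := out = exec_prog_alt data
instance (data : List (List String)) (out : List Int) : Decidable (Spec_exec_prog data out) := by unfold Spec_exec_prog; infer_instance

-- ===== CLAIM (what is proved, stated in full; the proofs are below) =====
def Claim_equal_exec_prog : Prop := ∀ (data : List (List String)), Dom_exec_prog data → Pre_exec_prog data → Spec_exec_prog data (exec_prog data)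

-- ===== LEMMAS AND PROOFS =====

-- inclusive prefix sums of a delta list, starting from total t
def pvScanFrom (t : Int) : List Int → List Int
  | [] => []
  | d :: ds => (t + d) :: pvScanFrom (t + d) ds

-- exclusive prefix sums (value BEFORE each delta)
def pvExcl (t : Int) : List Int → List Int
  | [] => []
  | d :: ds => t :: pvExcl (t + d) ds

theorem pvExcl_append (a b : List Int) : ∀ (t : Int),
    pvExcl t (a ++ b) = pvExcl t a ++ pvExcl (t + a.sum) b := by
  induction a with
  | nil => intro t; simp [pvExcl]
  | cons d ds ih => intro t; simp only [List.cons_append, pvExcl, List.sum_cons, ih, add_assoc]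

theorem pvExcl_snoc (t : Int) (ds : List Int) :
    pvExcl t ds ++ [t + ds.sum] = t :: pvScanFrom t ds := by
  induction ds generalizing t with
  | nil => simp [pvExcl, pvScanFrom]
  | cons d ds ih =>
      simp only [pvExcl, pvScanFrom, List.sum_cons, List.cons_append]
      rw [← add_assoc, ih]

-- one step of A's loop, described through that instruction's tick deltas
theorem stepA_eq (c : List Int) (x : Int) (ins : List String) :
    execProgStepA (c, x) ins = (c ++ pvExcl x (pvTicks ins), x + (pvTicks ins).sum) := by
  unfold execProgStepA pvTicks
  split_ifs with h1 h2 <;> simp [pvExcl]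

-- A's loop computes the exclusive scan over the flattened tick deltas
theorem foldA_eq (data : List (List String)) : ∀ (c : List Int) (x : Int),
    data.foldl execProgStepA (c, x)
      = (c ++ pvExcl x (data.flatMap pvTicks), x + (data.flatMap pvTicks).sum) := by
  induction data with
  | nil => intro c x; simp [pvExcl]
  | cons ins rest ih =>
      intro c x
      simp only [List.foldl, List.flatMap_cons, pvExcl_append, List.sum_append]
      rw [stepA_eq, ih]
      simp [add_assoc]

-- B's running-sum loop computes the inclusive scan after its seed
theorem foldB_eq (ds : List Int) : ∀ (l : List Int) (t : Int),
    (ds.foldl pvSumStep (l ++ [t])) = (l ++ [t]) ++ pvScanFrom t ds := by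
  induction ds with
  | nil => intro l t; simp [pvScanFrom]
  | cons d rest ih =>
      intro l t
      simp only [List.foldl, pvScanFrom]
      have hstep : pvSumStep (l ++ [t]) d = (l ++ [t]) ++ [t + d] := by
        simp [pvSumStep, PySem.List.pyGet?_neg_one_append_singleton]
      rw [hstep]
      have := ih (l ++ [t]) (t + d)
      simpa [List.append_assoc] using this

-- ===== VERDICT (by name: the statement is the Claim_ definition above) =====
theorem exec_prog_spec : Claim_equal_exec_prog := by
  intro data _ _
  unfold Spec_exec_prog exec_prog exec_prog_alt
  rw [foldA_eq]
  have hB := foldB_eq (data.flatMap pvTicks) [1] 1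
  simp only [show ([1, 1] : List Int) = [1] ++ [1] by rfl] at *
  rw [hB]
  simp [pvExcl_snoc]
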